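-- pv_equiv track=rewrite | github.com/rlarkdms/Algorithm_and_Test | level2/더 맵게.py | solution
-- ===== SOURCE A (Python) =====
-- def solution(scoville, K):
--     answer = 0
--     confirm=0
--
--     while True:
--         scoville.sort()
--         for i in scoville:
--             if i<K:
--
--                 scoville.append((scoville.pop(1)*2)+(scoville.pop(0)))
--                 confirm+=1
--                 if len(scoville)==1:#저 -1조건을 충족하기 위해 필요.
--                     if scoville[0]<K:
--                         return -1
--                 break
--         else:
--             return confirm
-- ===== SOURCE B (Python) =====
-- def solution(scoville, K):
--     s = sorted(scoville)
--     c = 0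
--     while s and s[0] < K:
--         if len(s) == 1:
--             return -1
--         x = s[1] * 2 + s[0]
--         del s[:2]
--         lo, hi = 0, len(s)
--         while lo < hi:
--             mid = (lo + hi) // 2
--             if s[mid] <= x:
--                 lo = mid + 1
--             else:
--                 hi = mid
--         s.insert(lo, x)
--         c += 1
--     return c
-- ===== Notes on version B (the rewrite author's own statement) =====
-- stated objective: faster
-- what changed: B sorts once and then maintains the sorted list itself, binary-searching the insertion point of each combined value, instead of A's full re-sort of the list on every mix; A also sorts its argument in place while B leaves it untouched (return values are what is proved equal).
import Mathlib
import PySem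

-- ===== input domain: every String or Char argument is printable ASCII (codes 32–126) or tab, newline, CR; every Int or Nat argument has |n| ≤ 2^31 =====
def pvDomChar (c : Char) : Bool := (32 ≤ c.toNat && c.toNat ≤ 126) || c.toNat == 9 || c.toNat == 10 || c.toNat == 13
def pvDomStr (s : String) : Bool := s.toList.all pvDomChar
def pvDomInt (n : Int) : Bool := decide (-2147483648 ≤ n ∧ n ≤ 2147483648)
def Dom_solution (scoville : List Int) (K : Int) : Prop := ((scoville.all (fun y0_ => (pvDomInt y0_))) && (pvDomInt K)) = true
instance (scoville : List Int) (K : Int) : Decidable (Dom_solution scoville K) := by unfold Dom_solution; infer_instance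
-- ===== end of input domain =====

-- B replaces A's per-mix full re-sort by one initial sort plus binary-search insertion of each
-- combined value (objective: faster). A sorts its argument in place (a visible side effect); B does
-- not: the equivalence proved here is about the RETURN value only.

-- ===== PORT A =====
-- the while-loop of A; fuel is only a structural-recursion bound (each mix shortens the list by 1,
-- so the initial fuel scoville.length + 1 is never exhausted)
def solutionLoopA (K : Int) (fuel : Nat) (scoville : List Int) (confirm : Int) : Int :=
  match fuel with
  | 0 => 0
  | fuel + 1 =>
    let s := PySem.List.sorted scoville (fun x => x) false   -- scoville.sort()
    -- the for-loop only reaches its body at the first i with i < K (then breaks);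
    -- the for-else returns confirm
    match s.find? (fun i => decide (i < K)) with
    | none => confirm
    | some _ =>
      match s with
      | a :: b :: rest =>
        -- scoville.append(scoville.pop(1)*2 + scoville.pop(0))
        let l' := rest ++ [b * 2 + a]
        if l'.length = 1 ∧ l'.headI < K then -1
        else solutionLoopA K fuel l' (confirm + 1)
      | _ => 0   -- Python raises IndexError here (pop(1) on a list shorter than 2); excluded by Pre_

def solution (scoville : List Int) (K : Int) : Int :=
  solutionLoopA K (scoville.length + 1) scoville 0

-- ===== PORT B =====
-- Source B's inner while lo < hi binary search; fuel is a structural bound (the interval halves,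
-- rest.length is always enough). s.getD mid 0 is exact: mid < hi ≤ s.length whenever it is read.
def binSearch (fuel : Nat) (s : List Int) (x : Int) (lo hi : Nat) : Nat :=
  match fuel with
  | 0 => lo
  | fuel + 1 =>
    if lo < hi then
      let mid := (lo + hi) / 2
      if s.getD mid 0 ≤ x then binSearch fuel s x (mid + 1) hi
      else binSearch fuel s x lo mid
    else lo

-- Source B's outer while loop over the maintained sorted list; fuel as in solutionLoopA
def solutionLoopB (K : Int) (fuel : Nat) (s : List Int) (c : Int) : Int :=
  match fuel with
  | 0 => 0
  | fuel + 1 =>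
    match s with
    | [] => c
    | [a] => if a < K then -1 else c       -- s and s[0] < K; len(s) == 1 → return -1
    | a :: b :: rest =>
      if a < K then
        let x := b * 2 + a                  -- x = s[1]*2 + s[0]; del s[:2]
        solutionLoopB K fuel (rest.insertIdx (binSearch rest.length rest x 0 rest.length) x) (c + 1)
      else c

def solution_alt (scoville : List Int) (K : Int) : Int :=
  solutionLoopB K (scoville.length + 1) (PySem.List.sorted scoville (fun x => x) false) 0

-- ===== PRECONDITION & SPEC =====
-- Pre_ excludes exactly the inputs on which A raises IndexError: a one-element list whose element
-- is below K (scoville.pop(1) on a singleton).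
def Pre_solution (scoville : List Int) (K : Int) : Prop :=
  scoville.length = 1 → K ≤ scoville.headI
instance (scoville : List Int) (K : Int) : Decidable (Pre_solution scoville K) := by
  unfold Pre_solution; infer_instance
def pvWitness_solution : List Int × Int := ([2, 5, 3], 4)

def Spec_solution (scoville : List Int) (K : Int) (out : Int) : Prop := out = solution_alt scoville K
instance (scoville : List Int) (K : Int) (out : Int) : Decidable (Spec_solution scoville K out) := by unfold Spec_solution; infer_instance

-- ===== CLAIM (what is proved, stated in full; the proofs are below) =====
def Claim_equal_solution : Prop := ∀ (scoville : List Int) (K : Int), Dom_solution scoville K → Pre_solution scoville K → Spec_solution scoville K (solution scoville K)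

-- ===== LEMMAS AND PROOFS =====

theorem pairwise_getElem_mono (s : List Int) (hs : List.Pairwise (· ≤ ·) s)
    {i j : Nat} (hi : i < s.length) (hj : j < s.length) (hij : i ≤ j) : s[i] ≤ s[j] := by
  rcases Nat.lt_or_ge i j with h | h
  · exact (List.pairwise_iff_getElem.mp hs) i j hi hj h
  · have : i = j := Nat.le_antisymm hij h
    subst this; exact le_refl _

theorem binSearch_spec (s : List Int) (x : Int) (hs : List.Pairwise (· ≤ ·) s) :
    ∀ (fuel lo hi : Nat), hi - lo ≤ fuel → lo ≤ hi → hi ≤ s.length →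
    (∀ j (hj : j < s.length), j < lo → s[j] ≤ x) →
    (∀ j (hj : j < s.length), hi ≤ j → x < s[j]) →
    binSearch fuel s x lo hi ≤ s.length ∧
    (∀ j (hj : j < s.length), j < binSearch fuel s x lo hi → s[j] ≤ x) ∧
    (∀ j (hj : j < s.length), binSearch fuel s x lo hi ≤ j → x < s[j]) := by
  intro fuel
  induction fuel with
  | zero =>
    intro lo hi hf hlh hhl hlow hhigh
    have : lo = hi := by omega
    subst this
    simp only [binSearch]
    exact ⟨by omega, hlow, fun j hj hje => hhigh j hj hje⟩
  | succ m ih =>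
    intro lo hi hf hlh hhl hlow hhigh
    simp only [binSearch]
    by_cases hlt : lo < hi
    · simp only [hlt, if_true]
      have hmidlt : (lo + hi) / 2 < hi := by omega
      have hmidge : lo ≤ (lo + hi) / 2 := by omega
      have hmlen : (lo + hi) / 2 < s.length := by omega
      rw [List.getD_eq_getElem s 0 hmlen]
      by_cases hc : s[(lo + hi) / 2] ≤ x
      · simp only [hc, if_true]
        exact ih ((lo + hi) / 2 + 1) hi (by omega) (by omega) hhl
          (fun j hj hjlt => le_trans (pairwise_getElem_mono s hs hj hmlen (by omega)) hc)
          hhigh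
      · simp only [hc, if_false]
        exact ih lo ((lo + hi) / 2) (by omega) (by omega) (by omega) hlow
          (fun j hj hjge => lt_of_lt_of_le (lt_of_not_ge hc)
            (pairwise_getElem_mono s hs hmlen hj hjge))
    · simp only [hlt, if_false]
      have : lo = hi := by omega
      subst this
      exact ⟨by omega, hlow, fun j hj hje => hhigh j hj hje⟩

theorem insertIdx_sorted_eq (s : List Int) (x : Int) (hs : List.Pairwise (· ≤ ·) s) :
    s.insertIdx (binSearch s.length s x 0 s.length) x
      = PySem.List.sorted (s ++ [x]) (fun y => y) false := by
  obtain ⟨hrle, hlow, hhigh⟩ :=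
    binSearch_spec s x hs s.length 0 s.length (by omega) (by omega) le_rfl
      (by intro j hj hj0; omega) (by intro j hj hjs; omega)
  set r := binSearch s.length s x 0 s.length with hr
  have hperm : (s.insertIdx r x).Perm (s ++ [x]) :=
    (List.perm_insertIdx x s hrle).trans (List.perm_append_singleton x s).symm
  have hlen : (s.insertIdx r x).length = s.length + 1 := by
    rw [List.length_insertIdx]; simp [hrle]
  have hpw : List.Pairwise (fun a b : Int => a ≤ b) (s.insertIdx r x) := by
    rw [List.pairwise_iff_getElem]
    intro i j hi hj hij
    rw [List.getElem_insertIdx, List.getElem_insertIdx]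
    split_ifs <;>
      first
        | omega
        | exact pairwise_getElem_mono s hs (by omega) (by omega) (by omega)
        | exact hlow _ (by omega) (by omega)
        | exact le_of_lt (hhigh _ (by omega) (by omega))
  exact (PySem.List.sorted_id_eq_of_perm_of_pairwise (s ++ [x]) (s.insertIdx r x) hperm hpw).symm

theorem sorted_singleton (y : Int) : PySem.List.sorted [y] (fun x => x) false = [y] :=
  PySem.List.sorted_eq_self_of_pairwise [y] (fun x => x) (List.pairwise_singleton _ _)

theorem loopAB (K : Int) : ∀ (n : Nat) (l : List Int) (c : Int), l.length < n →
    (l.length = 1 → K ≤ l.headI) →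
    solutionLoopA K n l c = solutionLoopB K n (PySem.List.sorted l (fun x => x) false) c := by
  intro n
  induction n with
  | zero => intro l c hn; omega
  | succ m ih =>
    intro l c hn h1
    have hlen : (PySem.List.sorted l (fun x => x) false).length = l.length :=
      PySem.List.length_sorted l (fun x => x) false
    have hpw : List.Pairwise (fun a b : Int => a ≤ b) (PySem.List.sorted l (fun x => x) false) :=
      PySem.List.sorted_pairwise l (fun x => x)
    cases hsrt : PySem.List.sorted l (fun x => x) false with
    | nil =>
      simp only [solutionLoopA, solutionLoopB, hsrt, List.find?_nil]
    | cons a t =>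
      cases t with
      | nil =>
        -- sorted l = [a]: then l = [a] and by h1, K ≤ a
        have hl1 : l.length = 1 := by rw [← hlen, hsrt]; rfl
        obtain ⟨y, hy⟩ := List.length_eq_one_iff.mp hl1
        subst hy
        have hay : a = y := by
          rw [sorted_singleton] at hsrt
          exact (List.cons_eq_cons.mp hsrt).1.symm
        subst hay
        have hKa : K ≤ a := by have := h1 (by simp); simpa [List.headI] using this
        have hfind : List.find? (fun i => decide (i < K)) [a] = none := by
          rw [List.find?_eq_none]
          intro z hz
          rcases List.mem_singleton.mp hz with rfl
          simp only [decide_eq_true_eq]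
          omega
        simp only [solutionLoopA, solutionLoopB, hsrt, hfind]
        rw [if_neg (show ¬ a < K by omega)]
      | cons b rest =>
        rw [hsrt, List.pairwise_cons] at hpw
        obtain ⟨hafirst, hpw'⟩ := hpw
        rw [List.pairwise_cons] at hpw'
        obtain ⟨hbfirst, hrest⟩ := hpw'
        have hllen : l.length = rest.length + 2 := by rw [← hlen, hsrt]; simp
        by_cases hak : a < K
        · -- mix the two smallest
          have hfind : List.find? (fun i => decide (i < K)) (a :: b :: rest) = some a := by
            simp [List.find?, hak]
          simp only [solutionLoopA, solutionLoopB, hsrt, hfind, if_pos hak]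
          rw [insertIdx_sorted_eq rest (b * 2 + a) hrest]
          by_cases hcond : (rest ++ [b * 2 + a]).length = 1 ∧ (rest ++ [b * 2 + a]).headI < K
          · rw [if_pos hcond]
            obtain ⟨hc1, hc2⟩ := hcond
            have hrnil : rest = [] := by
              rw [List.length_append] at hc1
              simpa [List.length_eq_zero_iff] using hc1
            subst hrnil
            simp only [List.nil_append] at hc2 ⊢
            rw [sorted_singleton]
            have hm : 2 ≤ m := by omega
            obtain ⟨m', rfl⟩ : ∃ m', m = m' + 1 := ⟨m - 1, by omega⟩
            simp only [solutionLoopB]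
            rw [if_pos (by simpa using hc2)]
          · rw [if_neg hcond]
            apply ih
            · simp; omega
            · intro hlen1
              have hrnil : rest = [] := by
                rw [List.length_append] at hlen1
                simpa [List.length_eq_zero_iff] using hlen1
              subst hrnil
              push Not at hcond
              exact hcond (by simp)
        · -- min ≥ K: everything ≥ K, the for-else returns confirm
          have hfind : List.find? (fun i => decide (i < K)) (a :: b :: rest) = none := by
            rw [List.find?_eq_none]
            intro y hy
            simp only [decide_eq_true_eq]
            rcases List.mem_cons.mp hy with rfl | hy'
            · omega
            · have : a ≤ y := hafirst y hy'
              omega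
          simp only [solutionLoopA, solutionLoopB, hsrt, hfind, if_neg hak]

-- ===== VERDICT (by name: the statement is the Claim_ definition above) =====
theorem solution_spec : Claim_equal_solution := by
  intro scoville K _hdom hpre
  unfold Spec_solution solution solution_alt
  exact loopAB K (scoville.length + 1) scoville 0 (by omega) hpre
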